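-- pv_equiv track=rewrite | github.com/anisssum/HW4_Functions2 | HW4_Chesnokova/animo_acid_tools.py | seq_charge
-- ===== SOURCE A (Python) =====
-- def seq_charge(seq: str) -> str:
--     """
--     Function evaluates the overall charge of the aminoacid chain in neutral aqueous solution (pH = 7)
--         Parameters:
--             seq (str): amino acid sequence of proteinogenic amino acids
--         Returns:
--             (str): "positive", "negative" or "neutral"
--     Function realized by Anna Chesnokova
--     """
--     aminoacid_charge = {'R': 1, 'D': -1, 'E': -1, 'K': 1, 'O': 1, 'r': 1, 'd': -1, 'e': -1, 'k': 1, 'o': 1}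
--     charge = 0
--     for aminoacid in seq:
--         if aminoacid in 'RDEKOrdeko':
--             charge += aminoacid_charge[aminoacid]
--     if charge > 0:
--         return 'positive'
--     elif charge < 0:
--         return 'negative'
--     else:
--         return 'neutral'
-- ===== SOURCE B (Python) =====
-- def seq_charge(seq: str) -> str:
--     """
--     Evaluate the overall charge of the amino acid chain at pH 7 by two
--     counting passes over the fixed charged-residue alphabets instead of a
--     character-by-character accumulating loop.
--     """
--     positive = sum(seq.count(a) for a in 'RKOrko')
--     negative = sum(seq.count(a) for a in 'DEde')
--     if positive > negative:
--         return 'positive'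
--     elif positive < negative:
--         return 'negative'
--     else:
--         return 'neutral'
-- ===== Notes on version B (the rewrite author's own statement) =====
-- stated objective: faster
-- what changed: Replaces the single character-by-character accumulating pass with a per-character dict lookup by two independent counting passes (a sum of str.count over the six positive residue letters and over the four negative residue letters) followed by a three-way comparison of the two counts.
import Mathlib
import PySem

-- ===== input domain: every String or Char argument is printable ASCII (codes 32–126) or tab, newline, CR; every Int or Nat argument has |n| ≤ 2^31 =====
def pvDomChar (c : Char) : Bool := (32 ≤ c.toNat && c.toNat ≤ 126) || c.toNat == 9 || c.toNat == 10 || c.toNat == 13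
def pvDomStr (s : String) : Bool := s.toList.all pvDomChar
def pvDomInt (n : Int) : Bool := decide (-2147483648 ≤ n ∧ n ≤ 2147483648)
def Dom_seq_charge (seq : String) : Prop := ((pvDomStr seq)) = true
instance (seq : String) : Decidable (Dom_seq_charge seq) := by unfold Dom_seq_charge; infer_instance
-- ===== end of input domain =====

-- B replaces A's single accumulating pass (dict lookup per character) by two independent
-- counting passes over the fixed charged-residue alphabets and a comparison of the counts.

-- ===== PORT A =====
def seq_charge (seq : String) : String :=
  let aminoacid_charge : PySem.Dict Char Int :=
    PySem.Dict.ofList [('R', 1), ('D', -1), ('E', -1), ('K', 1), ('O', 1), ('r', 1), ('d', -1), ('e', -1), ('k', 1), ('o', 1)]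
  let charge : Int :=
    seq.toList.foldl
      (fun charge aminoacid =>
        if PySem.Chars.isIn [aminoacid] "RDEKOrdeko".toList then
          -- dict subscript: the membership guard ensures the key is present, so KeyError is unreachable
          charge + (aminoacid_charge.get? aminoacid).getD 0
        else charge) 0
  if charge > 0 then "positive"
  else if charge < 0 then "negative"
  else "neutral"

-- ===== PORT B =====
def seq_charge_alt (seq : String) : String :=
  let positive : Nat := ("RKOrko".toList.map (fun a => PySem.Str.count seq (String.ofList [a]))).sum
  let negative : Nat := ("DEde".toList.map (fun a => PySem.Str.count seq (String.ofList [a]))).sum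
  if positive > negative then "positive"
  else if positive < negative then "negative"
  else "neutral"

-- ===== PRECONDITION & SPEC =====
def Spec_seq_charge (seq : String) (out : String) : Prop := out = seq_charge_alt seq
instance (seq : String) (out : String) : Decidable (Spec_seq_charge seq out) := by unfold Spec_seq_charge; infer_instance

-- ===== CLAIM (what is proved, stated in full; the proofs are below) =====
def Claim_equal_seq_charge : Prop := ∀ (seq : String), Dom_seq_charge seq → Spec_seq_charge seq (seq_charge seq)

-- ===== LEMMAS AND PROOFS =====

/-- Non-overlapping substring-count worker, specialised to a single-character needle,
    is plain element counting. -/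
theorem pv_go_singleton (c : Char) : ∀ (fuel : Nat) (l : List Char) (acc : Nat), l.length ≤ fuel →
    PySem.Chars.count.go [c] fuel l acc = acc + l.count c := by
  intro fuel
  induction fuel with
  | zero =>
    intro l acc h
    rw [Nat.le_zero, List.length_eq_zero_iff] at h
    subst h
    simp [PySem.Chars.count.go]
  | succ n ih =>
    intro l acc h
    cases l with
    | nil => simp [PySem.Chars.count.go]
    | cons x t =>
      simp only [List.length_cons, Nat.add_le_add_iff_right] at h
      simp only [PySem.Chars.count.go, List.isPrefixOf, List.count_cons]
      by_cases hx : c = x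
      · subst hx
        simp only [BEq.rfl, Bool.true_and, if_pos]
        rw [show List.drop (List.length [c]) (c :: t) = t from rfl]
        rw [ih t (acc + 1) h]
        omega
      · have hb : (c == x) = false := by rw [beq_eq_false_iff_ne]; exact hx
        simp only [hb, Bool.false_and, if_neg Bool.false_ne_true]
        rw [ih t acc h]
        have hb2 : (x == c) = false := by rw [beq_eq_false_iff_ne]; exact fun h => hx h.symm
        simp [hb2]

/-- `s.count(c)` for a one-character needle is `List.count`. -/
theorem pv_count_singleton (s : List Char) (c : Char) :
    PySem.Chars.count s [c] = s.count c := by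
  simp only [PySem.Chars.count, List.isEmpty_cons, Bool.false_eq_true, if_false]
  simpa using pv_go_singleton c s.length s 0 le_rfl

/-- A's accumulating loop computes (number of positive residues) − (number of negative residues). -/
theorem pv_foldA_eq (l : List Char) : ∀ c : Int,
    l.foldl
      (fun charge aminoacid =>
        if PySem.Chars.isIn [aminoacid] "RDEKOrdeko".toList then
          charge + ((PySem.Dict.ofList [('R', (1:Int)), ('D', -1), ('E', -1), ('K', 1), ('O', 1), ('r', 1), ('d', -1), ('e', -1), ('k', 1), ('o', 1)]).get? aminoacid).getD 0
        else charge) c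
    = c + ((l.count 'R' + l.count 'K' + l.count 'O' + l.count 'r' + l.count 'k' + l.count 'o' : Nat) : Int)
        - ((l.count 'D' + l.count 'E' + l.count 'd' + l.count 'e' : Nat) : Int) := by
  induction l with
  | nil => intro c; simp
  | cons a t ih =>
    intro c
    rw [List.foldl_cons, ih]
    by_cases ha : a ∈ ['R', 'D', 'E', 'K', 'O', 'r', 'd', 'e', 'k', 'o']
    · have hval : ∀ x ∈ (['R', 'D', 'E', 'K', 'O', 'r', 'd', 'e', 'k', 'o'] : List Char),
          ((PySem.Dict.ofList [('R', (1:Int)), ('D', -1), ('E', -1), ('K', 1), ('O', 1), ('r', 1), ('d', -1), ('e', -1), ('k', 1), ('o', 1)]).get? x).getD 0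
            = (if x ∈ (['R', 'K', 'O', 'r', 'k', 'o'] : List Char) then (1 : Int) else -1) := by
          intro x hx
          fin_cases hx <;> rfl
      simp only [List.mem_cons, List.not_mem_nil, or_false] at ha
      rcases ha with rfl | rfl | rfl | rfl | rfl | rfl | rfl | rfl | rfl | rfl <;>
        · simp only [show ∀ x : Char, PySem.Chars.isIn [x] "RDEKOrdeko".toList =
              decide (x ∈ ['R', 'D', 'E', 'K', 'O', 'r', 'd', 'e', 'k', 'o']) from fun x => by
                rw [show "RDEKOrdeko".toList = ['R', 'D', 'E', 'K', 'O', 'r', 'd', 'e', 'k', 'o'] from rfl]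
                by_cases hm : x ∈ ['R', 'D', 'E', 'K', 'O', 'r', 'd', 'e', 'k', 'o']
                · simp [hm, (PySem.Chars.isIn_iff_infix _ _).2 ((List.singleton_infix_iff _ _).2 hm)]
                · simp [hm, PySem.Chars.isIn_eq_false_iff, List.singleton_infix_iff]]
          rw [hval _ (by decide)]
          simp
          omega
    · have hno : PySem.Chars.isIn [a] "RDEKOrdeko".toList = false := by
        rw [PySem.Chars.isIn_eq_false_iff, List.singleton_infix_iff]
        rw [show "RDEKOrdeko".toList = ['R', 'D', 'E', 'K', 'O', 'r', 'd', 'e', 'k', 'o'] from rfl]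
        exact ha
      simp only [List.mem_cons, List.not_mem_nil, or_false, not_or] at ha
      obtain ⟨h1, h2, h3, h4, h5, h6, h7, h8, h9, h10⟩ := ha
      simp only [hno, Bool.false_eq_true, if_false]
      simp [h1, h2, h3, h4, h5, h6, h7, h8, h9, h10]

-- ===== VERDICT (by name: the statement is the Claim_ definition above) =====
theorem seq_charge_spec : Claim_equal_seq_charge := by
  intro seq _
  unfold Spec_seq_charge seq_charge seq_charge_alt
  simp only []
  rw [pv_foldA_eq]
  rw [show "RKOrko".toList = ['R', 'K', 'O', 'r', 'k', 'o'] from rfl,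
      show "DEde".toList = ['D', 'E', 'd', 'e'] from rfl]
  simp only [List.map_cons, List.map_nil, List.sum_cons, List.sum_nil, PySem.Str.count_eq]
  simp only [show (String.ofList ['R']).toList = ['R'] from rfl, show (String.ofList ['K']).toList = ['K'] from rfl,
    show (String.ofList ['O']).toList = ['O'] from rfl, show (String.ofList ['r']).toList = ['r'] from rfl,
    show (String.ofList ['k']).toList = ['k'] from rfl, show (String.ofList ['o']).toList = ['o'] from rfl,
    show (String.ofList ['D']).toList = ['D'] from rfl, show (String.ofList ['E']).toList = ['E'] from rfl,
    show (String.ofList ['d']).toList = ['d'] from rfl, show (String.ofList ['e']).toList = ['e'] from rfl]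
  simp only [pv_count_singleton]
  split_ifs <;> first | rfl | (exfalso; omega)
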